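-- pv_equiv track=rewrite | github.com/Harshsa28/Advent_of_code_2021 | src/21.py | get_unis
-- ===== SOURCE A (Python) =====
-- def get_pos_score(i):
--     pos = int(i / 31)+1
--     score = int(i % 31)
--     return pos, score
--
-- def is_coor_winning(x, y):
--     _, score_x = get_pos_score(x)
--     _, score_y = get_pos_score(y)
--     return score_x > 20 or score_y > 20
--
-- def get_unis(board):
--     p = 0
--     w = 0
--     for i in range(len(board)):
--         for j in range(len(board[i])):
--             if is_coor_winning(i, j):
--                 w += board[i][j]
--             else:
--                 p += board[i][j]
--     return (p, w)
-- ===== SOURCE B (Python) =====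
-- def get_unis(board):
--     total = sum(sum(row) for row in board)
--     p = 0
--     for i, row in enumerate(board):
--         if i % 31 <= 20:
--             for j, v in enumerate(row):
--                 if j % 31 <= 20:
--                     p += v
--     return (p, total - p)
-- ===== Notes on version B (the rewrite author's own statement) =====
-- stated objective: simpler
-- what changed: B keeps a single accumulator: it computes the grand total once with sum(), adds a cell to p only when neither index is winning (with the row predicate hoisted out of the inner loop), and derives the winning sum as total - p, instead of A's per-cell two-accumulator classification that re-evaluates the full predicate (and indexes board[i][j]) for every cell.
import Mathlib
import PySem

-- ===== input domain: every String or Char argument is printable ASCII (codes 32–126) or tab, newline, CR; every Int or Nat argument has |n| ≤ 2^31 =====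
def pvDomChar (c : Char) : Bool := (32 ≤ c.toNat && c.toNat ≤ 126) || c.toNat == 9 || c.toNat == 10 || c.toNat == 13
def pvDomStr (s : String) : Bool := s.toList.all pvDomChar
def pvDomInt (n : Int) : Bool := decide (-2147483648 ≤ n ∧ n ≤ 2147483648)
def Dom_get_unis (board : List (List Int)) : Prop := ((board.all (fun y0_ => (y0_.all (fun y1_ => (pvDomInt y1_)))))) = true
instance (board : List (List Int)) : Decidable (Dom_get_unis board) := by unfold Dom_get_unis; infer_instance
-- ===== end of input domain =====

-- B computes the grand total once and accumulates only the non-winning sum p, returning (p, total - p); objective: simpler (one accumulator, row predicate hoisted out of the inner loop).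

-- ===== PORT A =====
def get_pos_score (i : Int) : Int × Int :=
  let pos := PySem.Int.truncdiv i 31 + 1
  let score := PySem.Int.mod i 31
  (pos, score)

def is_coor_winning (x y : Int) : Bool :=
  ((get_pos_score x).2 > 20) || ((get_pos_score y).2 > 20)

def get_unis (board : List (List Int)) : Int × Int :=
  (PySem.List.pyRange 0 (board.length : Int) 1).foldl (fun (pw : Int × Int) i =>
    (PySem.List.pyRange 0 ((PySem.List.pyGetD board i []).length : Int) 1).foldl
      (fun (pw : Int × Int) j =>
        if is_coor_winning i j then
          (pw.1, pw.2 + PySem.List.pyGetD (PySem.List.pyGetD board i []) j 0)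
        else
          (pw.1 + PySem.List.pyGetD (PySem.List.pyGetD board i []) j 0, pw.2)) pw) (0, 0)

-- ===== PORT B =====
def get_unis_alt (board : List (List Int)) : Int × Int :=
  let total := (board.map (fun row => row.sum)).sum
  let p := (PySem.List.enumerate board 0).foldl (fun (p : Int) ir =>
    if PySem.Int.mod ir.1 31 ≤ 20 then
      (PySem.List.enumerate ir.2 0).foldl (fun (p : Int) jv =>
        if PySem.Int.mod jv.1 31 ≤ 20 then p + jv.2 else p) p
    else p) 0
  (p, total - p)

-- ===== PRECONDITION & SPEC =====
def Spec_get_unis (board : List (List Int)) (out : Int × Int) : Prop := out = get_unis_alt board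
instance (board : List (List Int)) (out : Int × Int) : Decidable (Spec_get_unis board out) := by unfold Spec_get_unis; infer_instance

-- ===== CLAIM (what is proved, stated in full; the proofs are below) =====
def Claim_equal_get_unis : Prop := ∀ (board : List (List Int)), Dom_get_unis board → Spec_get_unis board (get_unis board)

-- ===== LEMMAS AND PROOFS =====

-- xs[k] (total getD form) on a cons for a positive index steps to the tail
theorem pyGetD_cons_of_pos {α : Type} (x : α) (xs : List α) (k : Int) (d : α) (hk : 1 ≤ k) :
    PySem.List.pyGetD (x :: xs) k d = PySem.List.pyGetD xs (k - 1) d := by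
  simp only [PySem.List.pyGetD, PySem.List.pyGet?, PySem.List.pyIdx?, List.length_cons]
  rw [if_pos (by omega : (0:Int) ≤ k), if_pos (by omega : (0:Int) ≤ k - 1)]
  by_cases h : k - 1 < (xs.length : Int)
  · rw [if_pos (by push_cast; omega), if_pos h]
    have hkt : k.toNat = (k - 1).toNat + 1 := by omega
    rw [hkt]
    simp only [Option.bind_some, List.getElem?_cons_succ]
  · rw [if_neg (by push_cast; omega), if_neg h]
    rfl

-- a 'for j in range(len(r)): … r[j] …' loop whose body also uses the index j is the fold over enumerate r
theorem foldl_idx {α β : Type} (d : α) (g : β → Int → α → β) (r : List α) :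
    ∀ (a : Int) (init : β), 0 ≤ a →
    (PySem.List.pyRange a (a + (r.length : Int)) 1).foldl
        (fun acc j => g acc j (PySem.List.pyGetD r (j - a) d)) init
      = (PySem.List.enumerate r a).foldl (fun acc x => g acc x.1 x.2) init := by
  induction r with
  | nil =>
      intro a init ha
      rw [show a + ((List.length ([] : List α)) : Int) = a by simp]
      rw [PySem.List.pyRange_one_eq_nil le_rfl]
      simp [PySem.List.enumerate_nil]
  | cons x xs ih =>
      intro a init ha
      have hlen : a < a + (((x :: xs).length : Int)) := by
        simp only [List.length_cons]; push_cast; omega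
      rw [PySem.List.pyRange_one_cons hlen, List.foldl_cons,
          PySem.List.enumerate_cons, List.foldl_cons]
      rw [show a - a = (0 : Int) by ring, PySem.List.pyGetD_zero_cons]
      rw [show a + (((x :: xs).length : Int)) = (a + 1) + ((xs.length : Int)) by
            simp only [List.length_cons]; push_cast; ring]
      rw [PySem.List.foldl_congr_mem _ _
            (fun acc j => g acc j (PySem.List.pyGetD xs (j - (a + 1)) d)) _
            (by
              intro acc j hj
              have hj' := (PySem.List.mem_pyRange_one).1 hj
              rw [pyGetD_cons_of_pos x xs (j - a) d (by omega)]
              rw [show j - a - 1 = j - (a + 1) by ring])]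
      exact ih (a + 1) _ (by omega)

theorem foldl_idx0 {α β : Type} (d : α) (g : β → Int → α → β) (r : List α) (init : β) :
    (PySem.List.pyRange 0 (r.length : Int) 1).foldl
        (fun acc j => g acc j (PySem.List.pyGetD r j d)) init
      = (PySem.List.enumerate r 0).foldl (fun acc x => g acc x.1 x.2) init := by
  have h := foldl_idx d g r 0 init le_rfl
  simpa using h

-- B's contribution of row r at row index i
def contribRow (i : Int) (r : List Int) : Int :=
  if PySem.Int.mod i 31 ≤ 20 then
    ((PySem.List.enumerate r 0).map (fun jv => if PySem.Int.mod jv.1 31 ≤ 20 then jv.2 else 0)).sum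
  else 0

def Ctot (board : List (List Int)) : Int :=
  ((PySem.List.enumerate board 0).map (fun ir => contribRow ir.1 ir.2)).sum

def Tot (board : List (List Int)) : Int :=
  (board.map (fun row => row.sum)).sum

theorem win_iff (i j : Int) :
    (is_coor_winning i j = true) ↔ (20 < PySem.Int.mod i 31 ∨ 20 < PySem.Int.mod j 31) := by
  simp [is_coor_winning, get_pos_score]

-- A's inner loop over a row r at row index i, rephrased via the row contribution
theorem rowA (i : Int) (r : List Int) (p w : Int) :
    (PySem.List.enumerate r 0).foldl
        (fun (pw : Int × Int) jv =>
          if is_coor_winning i jv.1 then (pw.1, pw.2 + jv.2) else (pw.1 + jv.2, pw.2)) (p, w)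
      = (p + contribRow i r, w + (r.sum - contribRow i r)) := by
  have hfun : (fun (pw : Int × Int) (jv : Int × Int) =>
        if is_coor_winning i jv.1 then (pw.1, pw.2 + jv.2) else (pw.1 + jv.2, pw.2))
      = (fun (pw : Int × Int) (jv : Int × Int) =>
        (pw.1 + (if is_coor_winning i jv.1 then 0 else jv.2),
         pw.2 + (if is_coor_winning i jv.1 then jv.2 else 0))) := by
    funext pw jv
    split_ifs <;> simp
  rw [hfun]
  have hp := PySem.List.foldl_prod_mk
      (fun (a : Int) (jv : Int × Int) => a + (if is_coor_winning i jv.1 then 0 else jv.2))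
      (fun (b : Int) (jv : Int × Int) => b + (if is_coor_winning i jv.1 then jv.2 else 0))
      (PySem.List.enumerate r 0) p w
  beta_reduce at hp
  rw [hp]
  have ha1 := PySem.List.foldl_add (PySem.List.enumerate r 0)
      (fun (jv : Int × Int) => if is_coor_winning i jv.1 then 0 else jv.2) p
  have ha2 := PySem.List.foldl_add (PySem.List.enumerate r 0)
      (fun (jv : Int × Int) => if is_coor_winning i jv.1 then jv.2 else 0) w
  beta_reduce at ha1 ha2
  rw [ha1, ha2]
  have h0 : ((PySem.List.enumerate r 0).map
      (fun (jv : Int × Int) => if is_coor_winning i jv.1 then 0 else jv.2)).sum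
      = contribRow i r := by
    unfold contribRow
    have hm : ∀ t : Int, PySem.Int.mod t 31 = t % 31 :=
      fun t => PySem.Int.mod_eq_emod_of_pos (by norm_num)
    by_cases hi : (i % 31 : Int) ≤ 20
    · rw [if_pos (by rw [hm]; exact hi)]
      congr 1
      apply List.map_congr_left
      intro jv _
      simp only [win_iff, hm]
      split_ifs <;> omega
    · rw [if_neg (by rw [hm]; exact hi)]
      have hz : ∀ jv ∈ PySem.List.enumerate r 0,
          (if is_coor_winning i jv.1 then (0 : Int) else jv.2) = 0 := by
        intro jv _
        simp only [win_iff, hm]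
        rw [if_pos (Or.inl (by omega))]
      rw [List.map_congr_left hz]
      simp
  have h01 : ((PySem.List.enumerate r 0).map
        (fun (jv : Int × Int) => if is_coor_winning i jv.1 then 0 else jv.2)).sum
      + ((PySem.List.enumerate r 0).map
        (fun (jv : Int × Int) => if is_coor_winning i jv.1 then jv.2 else 0)).sum
      = r.sum := by
    rw [← PySem.List.sum_map_add_int]
    have : ∀ jv ∈ PySem.List.enumerate r 0,
        ((if is_coor_winning i jv.1 then (0 : Int) else jv.2)
          + (if is_coor_winning i jv.1 then jv.2 else 0)) = jv.2 := by
      intro jv _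
      split_ifs <;> simp
    rw [List.map_congr_left this, PySem.List.map_snd_enumerate]
  rw [Prod.mk.injEq]
  constructor <;> omega

-- B's inner fold grows its accumulator by the row contribution
theorem rowB (i : Int) (r : List Int) (p : Int) (hi : PySem.Int.mod i 31 ≤ 20) :
    (PySem.List.enumerate r 0).foldl
        (fun (p : Int) jv => if PySem.Int.mod jv.1 31 ≤ 20 then p + jv.2 else p) p
      = p + contribRow i r := by
  have hfun : (fun (p : Int) (jv : Int × Int) =>
        if PySem.Int.mod jv.1 31 ≤ 20 then p + jv.2 else p)
      = (fun (p : Int) (jv : Int × Int) =>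
        p + (if PySem.Int.mod jv.1 31 ≤ 20 then jv.2 else 0)) := by
    funext p jv
    split_ifs <;> simp
  rw [hfun]
  have ha := PySem.List.foldl_add (PySem.List.enumerate r 0)
      (fun (jv : Int × Int) => if PySem.Int.mod jv.1 31 ≤ 20 then jv.2 else 0) p
  beta_reduce at ha
  rw [ha]
  unfold contribRow
  rw [if_pos hi]

-- B's outer fold equals the sum of the row contributions
theorem outerB (bs : List (List Int)) :
    (PySem.List.enumerate bs 0).foldl (fun (p : Int) ir =>
        if PySem.Int.mod ir.1 31 ≤ 20 then
          (PySem.List.enumerate ir.2 0).foldl (fun (p : Int) jv =>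
            if PySem.Int.mod jv.1 31 ≤ 20 then p + jv.2 else p) p
        else p) 0
      = Ctot bs := by
  rw [PySem.List.foldl_congr_mem _ _
        (fun (p : Int) (ir : Int × List Int) => p + contribRow ir.1 ir.2) _
        (by
          intro acc ir _
          beta_reduce
          by_cases hi : PySem.Int.mod ir.1 31 ≤ 20
          · rw [if_pos hi, rowB ir.1 ir.2 acc hi]
          · rw [if_neg hi,
                show contribRow ir.1 ir.2 = 0 from by unfold contribRow; rw [if_neg hi],
                add_zero])]
  have ha := PySem.List.foldl_add (PySem.List.enumerate bs 0)
      (fun (ir : Int × List Int) => contribRow ir.1 ir.2) 0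
  beta_reduce at ha
  rw [ha, zero_add]
  rfl

-- characterization of port A
theorem A_char (board : List (List Int)) :
    get_unis board = (Ctot board, Tot board - Ctot board) := by
  unfold get_unis
  have hA := foldl_idx0 ([] : List Int)
      (fun (pw : Int × Int) (i : Int) (row : List Int) =>
        (PySem.List.pyRange 0 (row.length : Int) 1).foldl
          (fun (pw : Int × Int) j =>
            if is_coor_winning i j then (pw.1, pw.2 + PySem.List.pyGetD row j 0)
            else (pw.1 + PySem.List.pyGetD row j 0, pw.2)) pw) board ((0, 0) : Int × Int)
  beta_reduce at hA
  rw [hA]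
  rw [PySem.List.foldl_congr_mem _ _
        (fun (pw : Int × Int) (ir : Int × List Int) =>
          (pw.1 + contribRow ir.1 ir.2, pw.2 + (ir.2.sum - contribRow ir.1 ir.2))) _
        (by
          intro acc ir _
          have h1 := foldl_idx0 (0 : Int)
              (fun (pw : Int × Int) (j v : Int) =>
                if is_coor_winning ir.1 j then (pw.1, pw.2 + v) else (pw.1 + v, pw.2)) ir.2 acc
          beta_reduce at h1
          rw [h1]
          simpa using rowA ir.1 ir.2 acc.1 acc.2)]
  have hp := PySem.List.foldl_prod_mk
      (fun (a : Int) (ir : Int × List Int) => a + contribRow ir.1 ir.2)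
      (fun (b : Int) (ir : Int × List Int) => b + (ir.2.sum - contribRow ir.1 ir.2))
      (PySem.List.enumerate board 0) 0 0
  beta_reduce at hp
  rw [hp]
  have ha1 := PySem.List.foldl_add (PySem.List.enumerate board 0)
      (fun (ir : Int × List Int) => contribRow ir.1 ir.2) 0
  have ha2 := PySem.List.foldl_add (PySem.List.enumerate board 0)
      (fun (ir : Int × List Int) => ir.2.sum - contribRow ir.1 ir.2) 0
  beta_reduce at ha1 ha2
  rw [ha1, ha2]
  have hsplit := PySem.List.sum_map_add_int (PySem.List.enumerate board 0)
      (fun (ir : Int × List Int) => ir.2.sum - contribRow ir.1 ir.2)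
      (fun (ir : Int × List Int) => contribRow ir.1 ir.2)
  have hpt : ((PySem.List.enumerate board 0).map
        (fun (ir : Int × List Int) => (ir.2.sum - contribRow ir.1 ir.2) + contribRow ir.1 ir.2))
      = (PySem.List.enumerate board 0).map (fun (ir : Int × List Int) => ir.2.sum) := by
    apply List.map_congr_left
    intro ir _
    ring
  have hT : ((PySem.List.enumerate board 0).map
        (fun (ir : Int × List Int) => ir.2.sum)).sum = Tot board := by
    rw [show (fun (ir : Int × List Int) => ir.2.sum)
          = (fun (row : List Int) => row.sum) ∘ (fun (ir : Int × List Int) => ir.2) from rfl]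
    rw [← List.map_map, PySem.List.map_snd_enumerate]
    rfl
  rw [hpt] at hsplit
  rw [Prod.mk.injEq]
  constructor
  · rw [zero_add]; rfl
  · have : ((PySem.List.enumerate board 0).map
        (fun (ir : Int × List Int) => ir.2.sum - contribRow ir.1 ir.2)).sum
        = Tot board - Ctot board := by
      unfold Ctot
      omega
    omega

-- characterization of port B
theorem B_char (board : List (List Int)) :
    get_unis_alt board = (Ctot board, Tot board - Ctot board) := by
  simp only [get_unis_alt]
  rw [outerB]
  rfl

-- ===== VERDICT (by name: the statement is the Claim_ definition above) =====
theorem get_unis_spec : Claim_equal_get_unis := by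
  intro board _
  unfold Spec_get_unis
  rw [A_char, B_char]
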